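-- pv_equiv track=rewrite | github.com/hardening/topka | src/topka/utils.py | convertFormatString
-- ===== SOURCE A (Python) =====
-- def convertFormatString(v):
--     ret = ""
--     startPos = 0
--     while True:
--         #               v startIndex
--         #    ...........${var}
--         # startPos^          ^ endIndex
--         startIndex = v.find("${", startPos)
--         if startIndex < 0:
--             ret += v[startPos:]
--             return ret
--
--         endIndex = v.find("}", startIndex+2)
--         if endIndex < 0:
--             ret += v[startPos:]
--             return ret
--
--         ret += v[startPos : startIndex]
--         ret += "%(" + v[startIndex+2 : endIndex] + ")s"
--         startPos = endIndex + 1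
-- ===== SOURCE B (Python) =====
-- import re
--
-- def convertFormatString(v):
--     return re.sub(r'\$\{([^}]*)\}', r'%(\1)s', v)
-- ===== Notes on version B (the rewrite author's own statement) =====
-- stated objective: idiomatic
-- what changed: Replaced the manual find/slice while-loop with a single regex substitution (re.sub) rewriting each dollar-brace template to percent-paren format; the Lean port of B is the hand-ported leftmost-match scan of that regex.
import Mathlib
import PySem

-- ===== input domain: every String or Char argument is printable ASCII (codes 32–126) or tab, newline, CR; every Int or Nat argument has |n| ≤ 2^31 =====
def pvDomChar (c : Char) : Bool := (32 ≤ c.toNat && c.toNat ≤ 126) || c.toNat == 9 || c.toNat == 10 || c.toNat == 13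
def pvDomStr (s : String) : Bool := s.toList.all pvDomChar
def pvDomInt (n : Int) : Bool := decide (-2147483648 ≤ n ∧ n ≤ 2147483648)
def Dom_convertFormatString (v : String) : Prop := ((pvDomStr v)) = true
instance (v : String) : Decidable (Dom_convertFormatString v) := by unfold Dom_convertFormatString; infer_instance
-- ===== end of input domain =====

-- B is the idiomatic regex one-liner re.sub(r'\$\{([^}]*)\}', r'%(\1)s', v); same return value as A on every string.

-- ===== PORT A =====
-- literal transliteration of A's while-loop; fuel = v.length + 1 - startPos is only a
-- totality guard (the fuel-exhausted branch is proved unreachable in loopA_eq below)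
def pvLoopA (v : List Char) : Nat → Nat → List Char → List Char
  | 0, startPos, ret => ret ++ PySem.List.slice v (some (startPos : Int)) none
  | fuel + 1, startPos, ret =>
    let startIndex := PySem.Chars.findFrom v ['$', '{'] (startPos : Int) none
    if startIndex < 0 then
      ret ++ PySem.List.slice v (some (startPos : Int)) none
    else
      let endIndex := PySem.Chars.findFrom v ['}'] (startIndex + 2) none
      if endIndex < 0 then
        ret ++ PySem.List.slice v (some (startPos : Int)) none
      else
        pvLoopA v fuel (endIndex + 1).toNat
          (ret ++ PySem.List.slice v (some (startPos : Int)) (some startIndex)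
               ++ ['%', '('] ++ PySem.List.slice v (some (startIndex + 2)) (some endIndex)
               ++ [')', 's'])

def convertFormatString (v : String) : String :=
  String.ofList (pvLoopA v.toList (v.toList.length + 1) 0 [])

-- ===== PORT B =====
-- hand port of re.sub(r'\$\{([^}]*)\}', r'%(\1)s', v): left-to-right scan; at "${",
-- `[^}]*\}` takes the content up to the first '}' (pvBrk); if no '}' remains, no match
-- can start anywhere later either (a match needs a '}'), so the rest is emitted verbatim.
def pvBrk : List Char → Option (List Char × List Char)
  | [] => none
  | c :: cs => if c = '}' then some ([], cs) else (pvBrk cs).map (fun p => (c :: p.1, p.2))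

theorem pvBrk_some_length : ∀ (l a b : List Char), pvBrk l = some (a, b) → b.length < l.length := by
  intro l
  induction l with
  | nil => simp [pvBrk]
  | cons c cs ih =>
    intro a b h
    by_cases hc : c = '}'
    · simp [pvBrk, hc] at h
      simp [← h.2]
    · simp [pvBrk, hc] at h
      obtain ⟨p, hp, hp2⟩ := h
      have := ih p b hp
      simp only [List.length_cons]
      omega

def pvScanB : List Char → List Char
  | [] => []
  | c :: rest =>
    if c = '$' ∧ rest.head? = some '{' then
      match h : pvBrk rest.tail with
      | some (content, after) => '%' :: '(' :: content ++ ')' :: 's' :: pvScanB after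
      | none => c :: rest
    else c :: pvScanB rest
termination_by l => l.length
decreasing_by
  · have := pvBrk_some_length rest.tail _ _ h
    cases rest <;> simp_all <;> omega
  · simp

def convertFormatString_alt (v : String) : String :=
  String.ofList (pvScanB v.toList)

-- ===== PRECONDITION & SPEC =====
def Spec_convertFormatString (v : String) (out : String) : Prop := out = convertFormatString_alt v
instance (v : String) (out : String) : Decidable (Spec_convertFormatString v out) := by unfold Spec_convertFormatString; infer_instance

-- ===== CLAIM (what is proved, stated in full; the proofs are below) =====
def Claim_equal_convertFormatString : Prop := ∀ (v : String), Dom_convertFormatString v → Spec_convertFormatString v (convertFormatString v)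

-- ===== LEMMAS AND PROOFS =====

theorem pvScanB_nil : pvScanB [] = [] := by simp [pvScanB]

theorem pvScanB_cons_neg (c : Char) (rest : List Char)
    (hcond : ¬ (c = '$' ∧ rest.head? = some '{')) :
    pvScanB (c :: rest) = c :: pvScanB rest := by
  rw [pvScanB, if_neg hcond]

theorem pvScanB_cons_some (c : Char) (rest content after : List Char)
    (hcond : c = '$' ∧ rest.head? = some '{')
    (hbrk : pvBrk rest.tail = some (content, after)) :
    pvScanB (c :: rest) = '%' :: '(' :: content ++ ')' :: 's' :: pvScanB after := by
  rw [pvScanB, if_pos hcond]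
  split
  · next a b heq =>
    rw [hbrk] at heq
    injection heq with heq
    cases heq
    rfl
  · next heq =>
    rw [hbrk] at heq
    cases heq

theorem pvScanB_cons_none (c : Char) (rest : List Char)
    (hcond : c = '$' ∧ rest.head? = some '{')
    (hbrk : pvBrk rest.tail = none) :
    pvScanB (c :: rest) = c :: rest := by
  rw [pvScanB, if_pos hcond]
  split
  · next a b heq =>
    rw [hbrk] at heq
    cases heq
  · rfl

theorem pvBrk_none_of_not_mem (l : List Char) (h : '}' ∉ l) : pvBrk l = none := by
  induction l with
  | nil => simp [pvBrk]
  | cons c cs ih =>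
    simp at h
    simp [pvBrk, Ne.symm h.1, ih h.2]

theorem pvBrk_append (m t : List Char) (h : '}' ∉ m) :
    pvBrk (m ++ '}' :: t) = some (m, t) := by
  induction m with
  | nil => simp [pvBrk]
  | cons c cs ih =>
    simp at h
    simp [pvBrk, Ne.symm h.1, ih h.2]

theorem pvScanB_pre (pre t : List Char)
    (h : ∀ j < pre.length, ¬ ['$', '{'] <+: (pre ++ t).drop j) :
    pvScanB (pre ++ t) = pre ++ pvScanB t := by
  induction pre with
  | nil => simp
  | cons c cs ih =>
    have h0 := h 0 (by simp)
    simp only [List.drop_zero] at h0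
    have hcond : ¬ (c = '$' ∧ (cs ++ t).head? = some '{') := by
      rintro ⟨hc, hh⟩
      apply h0
      cases hcs : cs ++ t with
      | nil => simp [hcs] at hh
      | cons d ds =>
        simp [hcs] at hh
        simp [hc, hcs, hh, List.prefix_iff_eq_take]
    rw [List.cons_append, pvScanB_cons_neg _ _ hcond, ih]
    · simp
    · intro j hj
      have := h (j + 1) (by simp; omega)
      simpa using this

theorem pvScanB_id (s : List Char) (h : ∀ j, ¬ ['$', '{'] <+: s.drop j) :
    pvScanB s = s := by
  have := pvScanB_pre s [] (fun j _ => by simpa using h j)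
  simpa [pvScanB_nil] using this

theorem single_prefix_of_drop (l : List Char) (a : Char) (t : Nat) (ht : t < l.length)
    (h : l[t] = a) : [a] <+: l.drop t := by
  have : l.drop t = a :: l.drop (t + 1) := by
    rw [List.drop_eq_getElem_cons ht, h]
  rw [this]
  simp

theorem infix_of_prefix_drop (sub l : List Char) (j : Nat) (h : sub <+: l.drop j) :
    sub <:+: l := h.isInfix.trans (l.drop_suffix j).isInfix

-- the main invariant: A's loop from startPos equals B's scan of the remaining suffix
theorem loopA_eq (v : List Char) :
    ∀ (fuel startPos : Nat) (ret : List Char), startPos ≤ v.length →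
      v.length + 1 ≤ fuel + startPos →
      pvLoopA v fuel startPos ret = ret ++ pvScanB (v.drop startPos) := by
  intro fuel
  induction fuel with
  | zero => intro startPos ret h1 h2; omega
  | succ f ih =>
    intro startPos ret hsp hfuel
    set s := v.drop startPos with hs
    have hslen : s.length = v.length - startPos := by simp [hs]
    rw [pvLoopA]
    simp only
    rw [PySem.Chars.findFrom_natCast v ['$', '{'] startPos hsp]
    by_cases h1 : PySem.Chars.find s ['$', '{'] = -1
    · rw [← hs, if_pos h1, if_pos (by norm_num)]
      rw [PySem.List.slice_from_natCast, ← hs]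
      have hninf : ¬ ['$', '{'] <:+: s := (PySem.Chars.find_eq_neg_one_iff s _).mp h1
      rw [pvScanB_id s (fun j hj => hninf (infix_of_prefix_drop _ _ j hj))]
    · rw [← hs, if_neg h1]
      have hf1nn : 0 ≤ PySem.Chars.find s ['$', '{'] := by
        have := PySem.Chars.neg_one_le_find s ['$', '{']
        omega
      set i := (PySem.Chars.find s ['$', '{']).toNat with hi
      have hfind : PySem.Chars.find s ['$', '{'] = (i : Int) := by omega
      have hspec := PySem.Chars.find_spec (s := s) (sub := ['$', '{']) hf1nn
      rw [← hi] at hspec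
      obtain ⟨hpref, hmin⟩ := hspec
      obtain ⟨suf, hsuf⟩ : ∃ suf, s.drop i = '$' :: '{' :: suf := by
        obtain ⟨t, ht⟩ := hpref
        exact ⟨t, by simp [← ht]⟩
      have hilen : i + 2 ≤ s.length := by
        have : (s.drop i).length = s.length - i := by simp
        rw [hsuf] at this
        simp at this
        omega
      have hcast1 : (startPos : Int) + PySem.Chars.find s ['$', '{'] + 2
          = ((startPos + i + 2 : Nat) : Int) := by rw [hfind]; push_cast; ring
      have hnotneg : ¬ ((startPos : Int) + PySem.Chars.find s ['$', '{'] < 0) := by omega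
      rw [if_neg hnotneg, hcast1,
        PySem.Chars.findFrom_natCast v ['}'] (startPos + i + 2) (by omega)]
      have hdrop2 : v.drop (startPos + i + 2) = suf := by
        have h1 : (s.drop i).drop 2 = suf := by rw [hsuf]; rfl
        rw [hs, List.drop_drop, List.drop_drop] at h1
        exact h1
      rw [hdrop2]
      -- pre := s.take i
      have hstake : s = s.take i ++ '$' :: '{' :: suf := by
        conv_lhs => rw [← List.take_append_drop i s, hsuf]
      have htklen : (s.take i).length = i := by simp; omega
      have hscan_pre : pvScanB s = s.take i ++ pvScanB ('$' :: '{' :: suf) := by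
        conv_lhs => rw [hstake]
        refine pvScanB_pre _ _ ?_
        intro j hj
        rw [htklen] at hj
        rw [← hstake]
        exact hmin j hj
      by_cases h2 : PySem.Chars.find suf ['}'] = -1
      · rw [if_pos h2, if_pos (by norm_num), PySem.List.slice_from_natCast, ← hs]
        have hnomem : '}' ∉ suf := by
          intro hm
          obtain ⟨l1, l2, hl⟩ := List.append_of_mem hm
          exact (PySem.Chars.find_eq_neg_one_iff suf _).mp h2
            ⟨l1, l2, by simp [hl]⟩
        rw [hscan_pre, pvScanB_cons_none '$' ('{' :: suf) ⟨rfl, rfl⟩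
          (by simpa using pvBrk_none_of_not_mem suf hnomem)]
        rw [← hstake]
      · rw [if_neg h2]
        have hf2nn : 0 ≤ PySem.Chars.find suf ['}'] := by
          have := PySem.Chars.neg_one_le_find suf ['}']
          omega
        set j := (PySem.Chars.find suf ['}']).toNat with hj
        have hfind2 : PySem.Chars.find suf ['}'] = (j : Int) := by omega
        have hspec2 := PySem.Chars.find_spec (s := suf) (sub := ['}']) hf2nn
        rw [← hj] at hspec2
        obtain ⟨hpref2, hmin2⟩ := hspec2
        obtain ⟨after, hafter⟩ : ∃ after, suf.drop j = '}' :: after := by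
          obtain ⟨t, ht⟩ := hpref2
          exact ⟨t, by simp [← ht]⟩
        have hjlen : j + 1 ≤ suf.length := by
          have : (suf.drop j).length = suf.length - j := by simp
          rw [hafter] at this
          simp at this
          omega
        have hnotneg2 : ¬ (((startPos + i + 2 : Nat) : Int) + PySem.Chars.find suf ['}'] < 0) := by
          omega
        rw [if_neg hnotneg2]
        have hcastE : ((startPos + i + 2 : Nat) : Int) + PySem.Chars.find suf ['}'] + 1
            = ((startPos + i + 2 + j + 1 : Nat) : Int) := by rw [hfind2]; push_cast; ring
        have hcastE2 : ((startPos + i + 2 : Nat) : Int) + PySem.Chars.find suf ['}']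
            = ((startPos + i + 2 + j : Nat) : Int) := by rw [hfind2]; push_cast; ring
        have hsuflen : suf.length = s.length - i - 2 := by
          have : (s.drop i).length = s.length - i := by simp
          rw [hsuf] at this
          simp at this
          omega
        rw [hcastE, hcastE2, Int.toNat_natCast]
        -- slices
        have hsl1 : PySem.List.slice v (some (startPos : Int))
            (some ((startPos : Int) + PySem.Chars.find s ['$', '{'])) = s.take i := by
          have : (startPos : Int) + PySem.Chars.find s ['$', '{']
              = ((startPos + i : Nat) : Int) := by rw [hfind]; push_cast; ring
          rw [this, PySem.List.slice_natCast, ← hs]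
          congr 1
          omega
        have hsl2 : PySem.List.slice v (some ((startPos + i + 2 : Nat) : Int))
            (some ((startPos + i + 2 + j : Nat) : Int)) = suf.take j := by
          rw [PySem.List.slice_natCast, hdrop2]
          congr 1
          omega
        rw [hsl1, hsl2]
        rw [ih (startPos + i + 2 + j + 1) _ (by omega) (by omega)]
        have hdropA : v.drop (startPos + i + 2 + j + 1) = after := by
          have h1 : (suf.drop j).drop 1 = after := by rw [hafter]; rfl
          rw [← hdrop2, List.drop_drop, List.drop_drop] at h1
          exact h1
        rw [hdropA]
        -- B side
        have hmidnomem : '}' ∉ suf.take j := by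
          intro hm
          obtain ⟨t, ht, hget⟩ := List.getElem_of_mem hm
          have htj : t < j := by simp at ht; omega
          have : suf[t] = '}' := by
            rw [← hget]
            simp [List.getElem_take]
          exact hmin2 t htj (single_prefix_of_drop suf '}' t (by omega) this)
        have hsufsplit : suf = suf.take j ++ '}' :: after := by
          conv_lhs => rw [← List.take_append_drop j suf, hafter]
        have hbrk : pvBrk suf = some (suf.take j, after) := by
          conv_lhs => rw [hsufsplit]
          exact pvBrk_append _ _ hmidnomem
        rw [hscan_pre, pvScanB_cons_some '$' ('{' :: suf) (suf.take j) after ⟨rfl, rfl⟩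
          (by simpa using hbrk)]
        simp

-- ===== VERDICT (by name: the statement is the Claim_ definition above) =====
theorem convertFormatString_spec : Claim_equal_convertFormatString := by
  intro v _
  unfold Spec_convertFormatString convertFormatString convertFormatString_alt
  rw [loopA_eq v.toList (v.toList.length + 1) 0 [] (by omega) (by omega)]
  simp
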